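-- pv_equiv track=rewrite | github.com/calico/shorkie-paper | analysis/shorkie_lm/motif_analysis/motif_db_viz/3_viz_dna_string_logo.py | parse_motif
-- ===== SOURCE A (Python) =====
-- def parse_motif(motif_str):
--     """
--     Parse a motif string containing optional parentheses with slash-separated ambiguous bases.
--     E.g. 'G(C/A)GATGAG(A/C)TGA' -> ['G', 'C/A', 'G', ...]
--     """
--     tokens = []
--     i = 0
--     while i < len(motif_str):
--         if motif_str[i] == '(':
--             end = motif_str.find(')', i)
--             if end == -1:
--                 raise ValueError("Unmatched '(' in motif string")
--             tokens.append(motif_str[i+1:end])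
--             i = end + 1
--         else:
--             tokens.append(motif_str[i])
--             i += 1
--     return tokens
-- ===== SOURCE B (Python) =====
-- def parse_motif(motif_str):
--     """
--     Parse a motif string containing optional parentheses with slash-separated ambiguous bases.
--     Single left-to-right character scan with an `inside`-parentheses flag and a buffer.
--     """
--     tokens = []
--     inside = False
--     buf = ''
--     for ch in motif_str:
--         if inside:
--             if ch == ')':
--                 tokens.append(buf)
--                 inside = False
--                 buf = ''
--             else:
--                 buf += ch
--         elif ch == '(':
--             inside = True
--             buf = ''
--         else:
--             tokens.append(ch)
--     if inside:
--         raise ValueError("Unmatched '(' in motif string")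
--     return tokens
-- ===== Notes on version B (the rewrite author's own statement) =====
-- stated objective: alternative
-- what changed: Replaces the index-based while loop that calls str.find(')') and slices out each token with a single character-by-character state machine (inside flag + buffer accumulator).
import Mathlib
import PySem

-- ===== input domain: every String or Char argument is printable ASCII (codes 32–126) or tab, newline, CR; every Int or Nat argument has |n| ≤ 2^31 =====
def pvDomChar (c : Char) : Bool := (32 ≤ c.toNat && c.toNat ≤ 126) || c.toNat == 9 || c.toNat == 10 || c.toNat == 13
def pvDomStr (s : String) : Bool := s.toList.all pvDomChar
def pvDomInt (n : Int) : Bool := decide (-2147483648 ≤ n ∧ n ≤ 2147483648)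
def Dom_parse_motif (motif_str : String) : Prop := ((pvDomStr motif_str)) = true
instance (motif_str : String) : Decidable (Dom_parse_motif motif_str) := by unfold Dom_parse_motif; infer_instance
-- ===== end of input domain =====

-- B replaces A's index loop + str.find(')') + slicing with a one-pass state machine
-- (inside-parentheses flag and a character buffer); same cost, different decomposition.
-- On strings with an unmatched '(' both Pythons raise ValueError; Pre_ excludes exactly those.

-- ===== PORT A =====
-- A: while i < len: on '(' find the next ')' (raise if none), token = slice between,
-- jump past it; otherwise append the single character. Scanning from i with the '(' at
-- position i means the first ')' is searched in the remainder `rest`; the slice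
-- motif_str[i+1:end] is the part of `rest` before that ')', and i = end+1 resumes after it.
def parseA : List Char → List String
  | [] => []
  | c :: rest =>
    if c = '(' then
      if hmem : (')' ∈ rest) then
        -- end = motif_str.find(')', i); token = motif_str[i+1:end]; i = end + 1
        String.ofList (rest.takeWhile (· ≠ ')')) ::
          parseA ((rest.dropWhile (· ≠ ')')).drop 1)
      else
        []  -- Python raises ValueError("Unmatched '(' in motif string"); outside Pre_
    else
      String.ofList [c] :: parseA rest
termination_by l => l.length
decreasing_by
  · have h1 : (rest.dropWhile (· ≠ ')')).length ≤ rest.length :=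
      List.length_dropWhile_le (p := (· ≠ ')')) (l := rest)
    simp only [List.length_drop, List.length_cons]
    omega
  · simp only [List.length_cons]
    omega

def parse_motif (motif_str : String) : List String := parseA motif_str.toList

-- ===== PORT B =====
-- B: for each character, with state (inside, buf, tokens): inside + ')' flushes buf as a
-- token; inside otherwise extends buf; outside '(' enters; outside otherwise emits the char.
def parseB : List Char → Bool → List Char → List String → List String
  | [], _inside, _buf, tokens => tokens
      -- Python raises ValueError here when inside = true; outside Pre_
  | ch :: rest, inside, buf, tokens =>
    if inside then
      if ch = ')' then parseB rest false [] (tokens ++ [String.ofList buf])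
      else parseB rest true (buf ++ [ch]) tokens
    else if ch = '(' then parseB rest true [] tokens
    else parseB rest false [] (tokens ++ [String.ofList [ch]])

def parse_motif_alt (motif_str : String) : List String :=
  parseB motif_str.toList false [] []

-- ===== PRECONDITION & SPEC =====
-- Pre_ excludes exactly the strings with an unmatched '(' (a '(' with no ')' at or after
-- it): there Python A raises ValueError (and B raises the same ValueError).
def Pre_parse_motif (motif_str : String) : Prop :=
  ∀ i < motif_str.toList.length,
    motif_str.toList[i]? = some '(' → ')' ∈ motif_str.toList.drop i
instance (motif_str : String) : Decidable (Pre_parse_motif motif_str) := by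
  unfold Pre_parse_motif; infer_instance

def pvWitness_parse_motif : String := "G(C/A)T"

def Spec_parse_motif (motif_str : String) (out : List String) : Prop := out = parse_motif_alt motif_str
instance (motif_str : String) (out : List String) : Decidable (Spec_parse_motif motif_str out) := by unfold Spec_parse_motif; infer_instance

-- ===== CLAIM (what is proved, stated in full; the proofs are below) =====
def Claim_equal_parse_motif : Prop := ∀ (motif_str : String), Dom_parse_motif motif_str → Pre_parse_motif motif_str → Spec_parse_motif motif_str (parse_motif motif_str)

-- ===== LEMMAS AND PROOFS =====

-- the list-level precondition
def PreL (l : List Char) : Prop := ∀ i < l.length, l[i]? = some '(' → ')' ∈ l.drop i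

theorem preL_tail {c : Char} {l : List Char} (h : PreL (c :: l)) : PreL l := by
  intro i hi hg
  have := h (i + 1) (by simp; omega) (by simpa using hg)
  simpa using this

theorem preL_drop {l : List Char} (h : PreL l) : ∀ k, PreL (l.drop k) := by
  intro k
  induction k generalizing l with
  | zero => simpa using h
  | succ n ih =>
    cases l with
    | nil => intro i hi; simp at hi
    | cons c rest => simpa using ih (preL_tail h)

theorem dropWhile_eq_drop (p : Char → Bool) (l : List Char) :
    l.dropWhile p = l.drop (l.takeWhile p).length := by
  induction l with
  | nil => simp
  | cons c rest ih =>
    by_cases h : p c = true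
    · simp [List.takeWhile_cons, h, ih]
    · simp [List.takeWhile_cons, h]

-- B while inside: it consumes up to (and including) the first ')', emitting buf ++ prefix.
theorem parseB_inside (l : List Char) (hmem : ')' ∈ l) :
    ∀ (buf : List Char) (tokens : List String),
    parseB l true buf tokens =
      parseB ((l.dropWhile (· ≠ ')')).drop 1) false []
        (tokens ++ [String.ofList (buf ++ l.takeWhile (· ≠ ')'))]) := by
  induction l with
  | nil => simp at hmem
  | cons c rest ih =>
    intro buf tokens
    by_cases hc : c = ')'
    · subst hc
      simp [parseB, List.takeWhile_cons]
    · have hmem' : ')' ∈ rest := by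
        rcases List.mem_cons.mp hmem with h | h
        · exact absurd h.symm hc
        · exact h
      simp only [parseB, if_neg hc]
      rw [ih hmem' (buf ++ [c]) tokens]
      simp [List.takeWhile_cons, hc]

-- main invariant: on PreL inputs, B starting outside parentheses appends A's result.
theorem parseB_eq_parseA : ∀ (n : Nat) (l : List Char), l.length ≤ n → PreL l →
    ∀ tokens, parseB l false [] tokens = tokens ++ parseA l := by
  intro n
  induction n with
  | zero =>
    intro l hl _ tokens
    have : l = [] := List.eq_nil_of_length_eq_zero (Nat.le_zero.mp hl)
    subst this; simp [parseB, parseA]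
  | succ m ih =>
    intro l hl hpre tokens
    cases l with
    | nil => simp [parseB, parseA]
    | cons c rest =>
      by_cases hc : c = '('
      · subst hc
        have hmem : (')' : Char) ∈ rest := by
          simpa using hpre 0 (by simp) rfl
        have hstep : parseB ('(' :: rest) false [] tokens = parseB rest true [] tokens := by
          simp [parseB]
        rw [hstep, parseB_inside rest hmem [] tokens]
        have hrpre : PreL ((rest.dropWhile (· ≠ ')')).drop 1) := by
          rw [dropWhile_eq_drop, List.drop_drop]
          exact preL_drop (preL_tail hpre) _
        have hrlen : ((rest.dropWhile (· ≠ ')')).drop 1).length ≤ m := by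
          have h1 := List.length_dropWhile_le (p := fun c => decide (c ≠ ')')) (l := rest)
          simp only [List.length_cons] at hl
          simp only [List.length_drop]
          omega
        rw [ih _ hrlen hrpre]
        rw [parseA]
        simp [hmem]
      · have hstep : parseB (c :: rest) false [] tokens
            = parseB rest false [] (tokens ++ [String.ofList [c]]) := by
          simp [parseB, hc]
        rw [hstep, ih rest (by simpa using Nat.lt_succ_iff.mp (by simpa [List.length_cons, Nat.lt_succ_iff] using hl)) (preL_tail hpre)]
        rw [parseA]
        simp [hc]

-- ===== VERDICT (by name: the statement is the Claim_ definition above) =====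
theorem parse_motif_spec : Claim_equal_parse_motif := by
  intro s _dom hpre
  unfold Spec_parse_motif parse_motif parse_motif_alt
  have := parseB_eq_parseA s.toList.length s.toList le_rfl hpre []
  simpa using this.symm
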